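-- pv_equiv track=rewrite | github.com/Vminoz/AoC | 2025/vis/11.py | get_path_elements
-- ===== SOURCE A (Python) =====
-- from functools import cache
-- from typing import TypeAlias
--
-- Graph: TypeAlias = dict[str, list[str]]
--
-- def get_path_elements(
--     graph: Graph, start: str, end: str
-- ) -> tuple[set[str], set[tuple[str, str]]]:
--     """
--     Returns a tuple (nodes, edges) containing all nodes and edges
--     that are part of any valid path from start to end.
--     """
--
--     @cache
--     def can_reach_end(curr: str):
--         if curr == end:
--             return True
--         neighbors = graph.get(curr)
--         if not neighbors:
--             return False
--         return any(can_reach_end(n) for n in graph[curr])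
--
--     nodes = set()
--     edges = set()
--
--     if not can_reach_end(start):
--         return nodes, edges
--
--     stack = [start]
--     visited = set()
--     while stack:
--         node = stack.pop()
--         if node in visited:
--             continue
--         visited.add(node)
--
--         if not can_reach_end(node):
--             continue
--         nodes.add(node)
--
--         if node not in graph:
--             continue
--         for neighbor in graph[node]:
--             if can_reach_end(neighbor):
--                 edges.add((node, neighbor))
--                 stack.append(neighbor)
--
--     return nodes, edges
-- ===== SOURCE B (Python) =====
-- def get_path_elements(graph, start, end):
--     """
--     Returns a tuple (nodes, edges) containing all nodes and edges
--     that are part of any valid path from start to end.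
--     """
--     # r: all nodes that can reach `end`, computed as a backward fixpoint
--     # (no recursion, no memo cache).
--     r = {end}
--     changed = True
--     while changed:
--         changed = False
--         for u, vs in graph.items():
--             if u not in r and any(v in r for v in vs):
--                 r.add(u)
--                 changed = True
--
--     nodes = set()
--     edges = set()
--     if start not in r:
--         return nodes, edges
--
--     # forward walk from start, restricted to r; `nodes` doubles as visited.
--     stack = [start]
--     while stack:
--         u = stack.pop()
--         if u in nodes:
--             continue
--         nodes.add(u)
--         for v in graph.get(u, []):
--             if v in r:
--                 edges.add((u, v))
--                 stack.append(v)
--     return nodes, edges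
-- ===== Notes on version B (the rewrite author's own statement) =====
-- stated objective: alternative
-- what changed: A's memoized recursive can_reach_end predicate is replaced by an iterative backward fixpoint over the edge list computing the set of nodes that reach end, and the forward stack walk is simplified to a plain visited-set DFS over that set with no per-node reachability re-checks.
import Mathlib
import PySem

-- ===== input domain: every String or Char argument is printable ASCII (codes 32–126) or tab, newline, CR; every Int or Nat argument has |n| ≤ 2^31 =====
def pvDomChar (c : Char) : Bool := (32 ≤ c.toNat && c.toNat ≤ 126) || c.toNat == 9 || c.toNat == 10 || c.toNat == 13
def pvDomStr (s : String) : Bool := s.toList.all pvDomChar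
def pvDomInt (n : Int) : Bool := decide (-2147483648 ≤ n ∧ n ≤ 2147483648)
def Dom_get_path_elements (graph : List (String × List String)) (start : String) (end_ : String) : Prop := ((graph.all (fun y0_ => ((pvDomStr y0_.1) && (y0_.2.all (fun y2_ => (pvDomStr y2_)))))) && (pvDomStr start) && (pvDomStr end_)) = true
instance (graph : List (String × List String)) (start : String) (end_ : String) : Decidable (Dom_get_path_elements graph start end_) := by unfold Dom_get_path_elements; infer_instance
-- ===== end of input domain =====

-- B replaces A's memoized recursive can_reach_end with an iterative backward
-- fixpoint over the edge list and drops the per-node reachability re-checks from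
-- the forward walk (objective: alternative decomposition, no speed claim).

-- ===== PORT A =====
-- @cache on the pure helper can_reach_end only memoizes; the port recomputes the
-- same pure recursion, with fuel graph.length + 2 (enough for any acyclic call
-- chain: each recursive step descends into a distinct key; see Pre_ below).
def pvCanReach (g : List (String × List String)) (end_ : String) : Nat → String → Bool
  | 0, _ => false
  | fuel+1, curr =>
    if curr == end_ then true
    else match (PySem.Dict.mk g).get? curr with
      | none => false                                  -- graph.get(curr) is None
      | some ns => if ns.isEmpty then false            -- 'if not neighbors'
                   else ns.any (fun n => pvCanReach g end_ fuel n)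

-- the 'while stack' loop; the Lean stack keeps its top at the HEAD (Python
-- appends/pops at the end), so pop = head and each append conses.
def pvLoopA (g : List (String × List String)) (e : String) (cf : Nat) :
    Nat → List String → PySem.Set String → PySem.Set String → PySem.Set (String × String) →
    List String × List (String × String)
  | 0, _, _, nodes, edges => (nodes, edges)
  | _+1, [], _, nodes, edges => (nodes, edges)
  | f+1, node :: st, visited, nodes, edges =>
    if visited.contains node then pvLoopA g e cf f st visited nodes edges
    else
      let visited' := visited.add node
      if pvCanReach g e cf node = false then pvLoopA g e cf f st visited' nodes edges
      else
        let nodes' := nodes.add node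
        match (PySem.Dict.mk g).get? node with        -- 'if node not in graph: continue'
        | none => pvLoopA g e cf f st visited' nodes' edges
        | some ns =>
          let p := ns.foldl
            (fun (acc : List String × PySem.Set (String × String)) v =>
              if pvCanReach g e cf v then (v :: acc.1, acc.2.add (node, v)) else acc)
            (st, edges)
          pvLoopA g e cf f p.1 visited' nodes' p.2

-- loop fuel: the stack receives at most 1 + (sum of all neighbour-list lengths)
-- elements over the whole run, and each iteration pops exactly one.
def pvLoopFuel (g : List (String × List String)) : Nat :=
  g.foldl (fun a p => a + p.2.length) 1

def get_path_elements (graph : List (String × List String)) (start : String) (end_ : String) : List String × (List (String × String)) :=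
  let cf := graph.length + 2
  if pvCanReach graph end_ cf start = false then ([], [])
  else pvLoopA graph end_ cf (pvLoopFuel graph) [start] PySem.Set.empty PySem.Set.empty PySem.Set.empty

-- ===== PORT B =====
-- one 'for u, vs in graph.items()' pass of the fixpoint loop
def pvPass (g : List (String × List String)) (r : PySem.Set String) : PySem.Set String × Bool :=
  g.foldl
    (fun (acc : PySem.Set String × Bool) p =>
      if (!(acc.1.contains p.1) && p.2.any (fun v => acc.1.contains v)) then (acc.1.add p.1, true)
      else acc)
    (r, false)

-- the 'while changed' loop; fuel graph.length + 1: every changing pass adds a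
-- key not yet in r, so at most graph.length changing passes occur.
def pvFix (g : List (String × List String)) : Nat → PySem.Set String → PySem.Set String
  | 0, r => r
  | f+1, r => let p := pvPass g r; if p.2 then pvFix g f p.1 else p.1

-- B's forward walk ('nodes' doubles as the visited set)
def pvLoopB (g : List (String × List String)) (r : PySem.Set String) :
    Nat → List String → PySem.Set String → PySem.Set (String × String) →
    List String × List (String × String)
  | 0, _, nodes, edges => (nodes, edges)
  | _+1, [], nodes, edges => (nodes, edges)
  | f+1, u :: st, nodes, edges =>
    if nodes.contains u then pvLoopB g r f st nodes edges
    else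
      let nodes' := nodes.add u
      let p := (((PySem.Dict.mk g).get? u).getD []).foldl
        (fun (acc : List String × PySem.Set (String × String)) v =>
          if r.contains v then (v :: acc.1, acc.2.add (u, v)) else acc)
        (st, edges)
      pvLoopB g r f p.1 nodes' p.2

def get_path_elements_alt (graph : List (String × List String)) (start : String) (end_ : String) : List String × (List (String × String)) :=
  let r := pvFix graph (graph.length + 1) (PySem.Set.add PySem.Set.empty end_)
  if r.contains start = false then ([], [])
  else pvLoopB graph r (pvLoopFuel graph) [start] PySem.Set.empty PySem.Set.empty

-- ===== PRECONDITION & SPEC =====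
-- Forward reachability of the INPUT graph (a property of the data, used by
-- neither port: A's helper recurses backward towards end_, B saturates a
-- backward fixpoint from end_). graph.length rounds saturate the closure.
def pvClosStep (g : List (String × List String)) (s : PySem.Set String) : PySem.Set String :=
  s.foldl (fun acc u => PySem.Set.update acc (((PySem.Dict.mk g).get? u).getD [])) s

def pvClos (g : List (String × List String)) : Nat → PySem.Set String → PySem.Set String
  | 0, s => s
  | f+1, s => pvClos g f (pvClosStep g s)

-- Pre_ excludes (a) association lists with duplicate keys, which do not denote a
-- Python dict, and (b) graphs with a cycle reachable from start: there A's
-- unbounded uncached-in-progress recursion can_reach_end can hit Python's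
-- recursion limit (RecursionError); on some such graphs the cache happens to
-- save A and it returns the same sets B returns (see cites).
def Pre_get_path_elements (graph : List (String × List String)) (start : String) (end_ : String) : Prop :=
  (graph.map Prod.fst).Nodup ∧
  ∀ u ∈ pvClos graph (graph.length + 1) (PySem.Set.add PySem.Set.empty start),
    u ∉ pvClos graph (graph.length + 1)
        (PySem.Set.ofList (((PySem.Dict.mk graph).get? u).getD []))
instance (graph : List (String × List String)) (start : String) (end_ : String) : Decidable (Pre_get_path_elements graph start end_) := by unfold Pre_get_path_elements; infer_instance

def pvWitness_get_path_elements : (List (String × List String)) × String × String :=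
  ([("s", ["a", "b"]), ("a", ["e"]), ("b", ["a"])], "s", "e")

def Spec_get_path_elements (graph : List (String × List String)) (start : String) (end_ : String) (out : List String × (List (String × String))) : Prop := out = get_path_elements_alt graph start end_
instance (graph : List (String × List String)) (start : String) (end_ : String) (out : List String × (List (String × String))) : Decidable (Spec_get_path_elements graph start end_ out) := by unfold Spec_get_path_elements; infer_instance

-- ===== CLAIM (what is proved, stated in full; the proofs are below) =====
def Claim_equal_get_path_elements : Prop := ∀ (graph : List (String × List String)) (start : String) (end_ : String), Dom_get_path_elements graph start end_ → Pre_get_path_elements graph start end_ → Spec_get_path_elements graph start end_ (get_path_elements graph start end_)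

-- ===== LEMMAS AND PROOFS =====

-- 'u can reach end_ along a path of at most n edges'
def pvReachN (g : List (String × List String)) (e : String) : Nat → String → Prop
  | 0, u => u = e
  | n+1, u => u = e ∨ ∃ vs, (PySem.Dict.mk g).get? u = some vs ∧ ∃ v ∈ vs, pvReachN g e n v

theorem pvReachN_canReach (g : List (String × List String)) (e : String) :
    ∀ n u, pvReachN g e n u → ∀ f, n < f → pvCanReach g e f u = true := by
  intro n
  induction n with
  | zero =>
    intro u h f hf
    obtain ⟨f', rfl⟩ := Nat.exists_eq_add_of_lt hf
    simp only [pvReachN] at h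
    simp [pvCanReach, h]
  | succ n ih =>
    intro u h f hf
    obtain ⟨f', hfe⟩ : ∃ f', f = f' + 1 := ⟨f - 1, by omega⟩
    subst hfe
    simp only [pvReachN] at h
    rcases h with rfl | ⟨vs, hget, v, hv, hr⟩
    · simp [pvCanReach]
    · simp only [pvCanReach]
      by_cases he : (u == e) = true
      · simp [he]
      · rw [if_neg he, hget]
        have hne : vs.isEmpty = false := by
          cases vs with
          | nil => cases hv
          | cons a l => rfl
        simp only [hne, Bool.false_eq_true, if_false, List.any_eq_true]
        exact ⟨v, hv, ih v hr f' (by omega)⟩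

-- the body of one entry of B's fixpoint pass
def pvStepF : PySem.Set String × Bool → String × List String → PySem.Set String × Bool :=
  fun acc p =>
    if (!(acc.1.contains p.1) && p.2.any (fun v => acc.1.contains v)) then (acc.1.add p.1, true)
    else acc

theorem pvPass_eq (g : List (String × List String)) (r : PySem.Set String) :
    pvPass g r = g.foldl pvStepF (r, false) := rfl

theorem pvStep_grow (acc : PySem.Set String × Bool) (p : String × List String) :
    ∀ x ∈ acc.1, x ∈ (pvStepF acc p).1 := by
  intro x hx
  unfold pvStepF
  split
  · exact (PySem.Set.mem_add _ _ _).mpr (Or.inl hx)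
  · exact hx

theorem pvFoldF_grow :
    ∀ (l : List (String × List String)) (acc : PySem.Set String × Bool),
      ∀ x ∈ acc.1, x ∈ (l.foldl pvStepF acc).1 := by
  intro l
  induction l with
  | nil => intro acc x hx; exact hx
  | cons p l ih => intro acc x hx; exact ih _ x (pvStep_grow acc p x hx)

theorem pvFoldF_chTrue :
    ∀ (l : List (String × List String)) (acc : PySem.Set String × Bool),
      acc.2 = true → (l.foldl pvStepF acc).2 = true := by
  intro l
  induction l with
  | nil => intro acc h; exact h
  | cons p l ih =>
    intro acc h
    refine ih _ ?_
    unfold pvStepF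
    split
    · rfl
    · exact h

theorem pvFoldF_false :
    ∀ (l : List (String × List String)) (acc : PySem.Set String × Bool),
      (l.foldl pvStepF acc).2 = false →
      (l.foldl pvStepF acc).1 = acc.1 ∧
      ∀ p ∈ l, p.2.any (fun v => acc.1.contains v) = true → acc.1.contains p.1 = true := by
  intro l
  induction l with
  | nil => intro acc _; exact ⟨rfl, by simp⟩
  | cons p l ih =>
    intro acc h
    rw [List.foldl_cons] at h
    by_cases hb : (!(acc.1.contains p.1) && p.2.any (fun v => acc.1.contains v)) = true
    · exfalso
      have : (pvStepF acc p).2 = true := by unfold pvStepF; rw [if_pos hb]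
      have := pvFoldF_chTrue l _ this
      rw [this] at h; cases h
    · have hstep : pvStepF acc p = acc := by unfold pvStepF; rw [if_neg hb]
      rw [hstep] at h
      obtain ⟨h1, h2⟩ := ih acc h
      rw [List.foldl_cons, hstep]
      refine ⟨h1, ?_⟩
      intro q hq hany
      rcases List.mem_cons.mp hq with rfl | hq'
      · rcases Bool.eq_false_or_eq_true (acc.1.contains q.1) with ht | hf
        · exact ht
        · exact absurd (by rw [hf, hany]; rfl : (!(acc.1.contains q.1) && q.2.any (fun v => acc.1.contains v)) = true) hb
      · exact h2 q hq' hany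

theorem pvFoldF_witness :
    ∀ (l : List (String × List String)) (acc : PySem.Set String × Bool),
      (l.foldl pvStepF acc).2 = true →
      acc.2 = true ∨ ∃ k ∈ l.map Prod.fst, k ∉ acc.1 ∧ k ∈ (l.foldl pvStepF acc).1 := by
  intro l
  induction l with
  | nil => intro acc h; exact Or.inl h
  | cons p l ih =>
    intro acc h
    rw [List.foldl_cons] at h
    by_cases hb : (!(acc.1.contains p.1) && p.2.any (fun v => acc.1.contains v)) = true
    · right
      have hstep : pvStepF acc p = (acc.1.add p.1, true) := by unfold pvStepF; rw [if_pos hb]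
      have hnm : p.1 ∉ acc.1 := by
        intro hm
        have := (Bool.and_eq_true _ _).mp hb |>.1
        rw [(PySem.Set.contains_iff _ _).mpr hm] at this
        cases this
      refine ⟨p.1, by simp, hnm, ?_⟩
      rw [List.foldl_cons, hstep]
      exact pvFoldF_grow l _ p.1 ((PySem.Set.mem_add _ _ _).mpr (Or.inr rfl))
    · have hstep : pvStepF acc p = acc := by unfold pvStepF; rw [if_neg hb]
      rw [hstep] at h
      rcases ih acc h with h' | ⟨k, hk, h1, h2⟩
      · exact Or.inl h'
      · right
        refine ⟨k, ?_, h1, ?_⟩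
        · simp only [List.map_cons, List.mem_cons]; exact Or.inr (by simpa using hk)
        · rw [List.foldl_cons, hstep]; exact h2

-- structural invariant of r: nodup, inside {e} ∪ keys, every member reaches e
-- within fewer steps than the current size of r
def pvInv (g : List (String × List String)) (e : String) (r : PySem.Set String) : Prop :=
  r.Nodup ∧ (∀ x ∈ r, x = e ∨ x ∈ g.map Prod.fst) ∧
  (∀ u ∈ r, ∃ n, n + 1 ≤ r.length ∧ pvReachN g e n u)

theorem pvStep_inv (g : List (String × List String)) (e : String)
    (hnd : (g.map Prod.fst).Nodup) (acc : PySem.Set String × Bool)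
    (p : String × List String) (hp : p ∈ g) (h : pvInv g e acc.1) :
    pvInv g e (pvStepF acc p).1 := by
  unfold pvStepF
  by_cases hb : (!(acc.1.contains p.1) && p.2.any (fun v => acc.1.contains v)) = true
  · rw [if_pos hb]
    obtain ⟨hbc, hbany⟩ := (Bool.and_eq_true _ _).mp hb
    have hnm : p.1 ∉ acc.1 := by
      intro hm
      rw [(PySem.Set.contains_iff _ _).mpr hm] at hbc
      cases hbc
    have hlen : (acc.1.add p.1).length = acc.1.length + 1 := by
      rw [PySem.Set.add_of_not_mem hnm]; simp
    show pvInv g e (acc.1.add p.1)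
    refine ⟨PySem.Set.nodup_add _ _ h.1, ?_, ?_⟩
    · intro x hx
      rcases (PySem.Set.mem_add _ _ _).mp hx with hx' | rfl
      · exact h.2.1 x hx'
      · exact Or.inr (List.mem_map.mpr ⟨p, hp, rfl⟩)
    · intro u hu
      rcases (PySem.Set.mem_add _ _ _).mp hu with hu' | rfl
      · obtain ⟨n, hn, hr⟩ := h.2.2 u hu'
        exact ⟨n, by omega, hr⟩
      · obtain ⟨v, hv, hcv⟩ := List.any_eq_true.mp hbany
        have hvm : v ∈ acc.1 := (PySem.Set.contains_iff _ _).mp hcv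
        obtain ⟨m, hm, hrm⟩ := h.2.2 v hvm
        refine ⟨m + 1, by omega, ?_⟩
        refine Or.inr ⟨p.2, ?_, v, hv, hrm⟩
        exact (PySem.Dict.get?_eq_some_iff_mem_items (PySem.Dict.mk g) p.1 p.2
          (by simpa using hnd)).mpr hp
  · rw [if_neg hb]; exact h

theorem pvFoldF_inv (g : List (String × List String)) (e : String)
    (hnd : (g.map Prod.fst).Nodup) :
    ∀ (l : List (String × List String)) (acc : PySem.Set String × Bool),
      (∀ p ∈ l, p ∈ g) → pvInv g e acc.1 → pvInv g e (l.foldl pvStepF acc).1 := by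
  intro l
  induction l with
  | nil => intro acc _ h; exact h
  | cons p l ih =>
    intro acc hl h
    exact ih _ (fun q hq => hl q (List.mem_cons_of_mem p hq))
      (pvStep_inv g e hnd acc p (hl p (List.mem_cons_self ..)) h)

theorem pvFix_inv (g : List (String × List String)) (e : String)
    (hnd : (g.map Prod.fst).Nodup) :
    ∀ (fuel : Nat) (r : PySem.Set String), pvInv g e r → pvInv g e (pvFix g fuel r) := by
  intro fuel
  induction fuel with
  | zero => intro r h; exact h
  | succ f ih =>
    intro r h
    have hpass : pvInv g e (pvPass g r).1 := by
      rw [pvPass_eq]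
      exact pvFoldF_inv g e hnd g (r, false) (fun q hq => hq) h
    simp only [pvFix]
    split
    · exact ih _ hpass
    · exact hpass

-- with fuel exceeding the number of keys missing from r, the fixpoint loop
-- terminates through a 'no change' pass, hence is closed and contains r
theorem pvFix_closed (g : List (String × List String)) :
    ∀ (fuel : Nat) (r : PySem.Set String),
      ((g.map Prod.fst).toFinset.filter (fun k => ¬ k ∈ r)).card < fuel →
      (∀ x ∈ r, x ∈ pvFix g fuel r) ∧
      ∀ p ∈ g, p.2.any (fun v => PySem.Set.contains (pvFix g fuel r) v) = true →
        (pvFix g fuel r).contains p.1 = true := by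
  intro fuel
  induction fuel with
  | zero => intro r h; omega
  | succ f ih =>
    intro r h
    simp only [pvFix]
    cases hch : (pvPass g r).2 with
    | false =>
      simp only [Bool.false_eq_true, if_false]
      obtain ⟨h1, h2⟩ := pvFoldF_false g (r, false) (by rw [← pvPass_eq]; exact hch)
      rw [← pvPass_eq] at h1
      rw [h1]
      refine ⟨fun x hx => hx, ?_⟩
      intro p hp hany
      exact h2 p hp hany
    | true =>
      simp only [if_true]
      have hw : ∃ k ∈ g.map Prod.fst, k ∉ (r : List String) ∧ k ∈ (g.foldl pvStepF (r, false)).1 := by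
        rcases pvFoldF_witness g (r, false) (by rw [← pvPass_eq]; exact hch) with h' | h'
        · exact absurd h' (by simp)
        · exact h'
      obtain ⟨k, hk, hknm, hkm⟩ := hw
      rw [← pvPass_eq] at hkm
      have hgrow : ∀ x ∈ r, x ∈ (pvPass g r).1 := by
        intro x hx
        rw [pvPass_eq]
        exact pvFoldF_grow g (r, false) x hx
      have hcard : ((g.map Prod.fst).toFinset.filter (fun q => ¬ q ∈ (pvPass g r).1)).card
          < ((g.map Prod.fst).toFinset.filter (fun q => ¬ q ∈ r)).card := by
        apply Finset.card_lt_card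
        constructor
        · intro x hx
          simp only [Finset.mem_filter] at hx ⊢
          exact ⟨hx.1, fun hm => hx.2 (hgrow x hm)⟩
        · intro hsub
          have : k ∈ (g.map Prod.fst).toFinset.filter (fun q => ¬ q ∈ (pvPass g r).1) :=
            hsub (by simp only [Finset.mem_filter, List.mem_toFinset]; exact ⟨hk, hknm⟩)
          simp only [Finset.mem_filter] at this
          exact this.2 hkm
      obtain ⟨ih1, ih2⟩ := ih (pvPass g r).1 (by omega)
      exact ⟨fun x hx => ih1 x (hgrow x hx), ih2⟩

theorem pvCanReach_sound (g : List (String × List String)) (e : String)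
    (R : PySem.Set String) (he : e ∈ R)
    (hc : ∀ p ∈ g, p.2.any (fun v => PySem.Set.contains R v) = true → R.contains p.1 = true) :
    ∀ f u, pvCanReach g e f u = true → u ∈ R := by
  intro f
  induction f with
  | zero => intro u h; simp [pvCanReach] at h
  | succ f ih =>
    intro u h
    by_cases he' : (u == e) = true
    · rw [eq_of_beq he']; exact he
    · simp only [pvCanReach, if_neg he'] at h
      cases hg : (PySem.Dict.mk g).get? u with
      | none =>
        rw [hg] at h
        exact absurd (h : false = true) (by simp)
      | some ns =>
        rw [hg] at h
        have h' : (if ns.isEmpty then false else ns.any fun n => pvCanReach g e f n) = true := h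
        have hpm : (u, ns) ∈ g := PySem.Dict.mem_items_of_get?_eq_some (PySem.Dict.mk g) hg
        cases hne : ns.isEmpty with
        | true => rw [hne] at h'; exact absurd h' (by simp)
        | false =>
          rw [hne] at h'
          simp only [Bool.false_eq_true, if_false, List.any_eq_true] at h'
          obtain ⟨v, hv, hcv⟩ := h'
          have hvR : v ∈ R := ih v hcv
          have : R.contains u = true := by
            refine hc (u, ns) hpm ?_
            exact List.any_eq_true.mpr ⟨v, hv, (PySem.Set.contains_iff _ _).mpr hvR⟩
          exact (PySem.Set.contains_iff _ _).mp this

-- the heart: A's fueled recursion and B's fixpoint agree on every node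
theorem pvReach_agree (g : List (String × List String)) (e : String)
    (hnd : (g.map Prod.fst).Nodup) :
    ∀ u, pvCanReach g e (g.length + 2) u
         = (pvFix g (g.length + 1) (PySem.Set.add PySem.Set.empty e)).contains u := by
  intro u
  have hr0 : (PySem.Set.add PySem.Set.empty e) = [e] := rfl
  have hcard : ((g.map Prod.fst).toFinset.filter
      (fun k => ¬ k ∈ (PySem.Set.add PySem.Set.empty e))).card < g.length + 1 := by
    calc ((g.map Prod.fst).toFinset.filter (fun k => ¬ k ∈ (PySem.Set.add PySem.Set.empty e))).card
        ≤ (g.map Prod.fst).toFinset.card := Finset.card_filter_le _ _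
      _ ≤ (g.map Prod.fst).length := List.toFinset_card_le _
      _ = g.length := List.length_map ..
      _ < g.length + 1 := by omega
  obtain ⟨hsub, hclosed⟩ := pvFix_closed g (g.length + 1) (PySem.Set.add PySem.Set.empty e) hcard
  have heR : e ∈ pvFix g (g.length + 1) (PySem.Set.add PySem.Set.empty e) :=
    hsub e (by rw [hr0]; exact List.mem_singleton.mpr rfl)
  have hinv : pvInv g e (pvFix g (g.length + 1) (PySem.Set.add PySem.Set.empty e)) := by
    refine pvFix_inv g e hnd _ _ ?_
    rw [hr0]
    refine ⟨List.nodup_singleton e, ?_, ?_⟩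
    · intro x hx; exact Or.inl (List.mem_singleton.mp hx)
    · intro x hx
      rw [List.mem_singleton.mp hx]
      exact ⟨0, by simp, rfl⟩
  apply Bool.coe_iff_coe.mp
  constructor
  · intro h
    exact (PySem.Set.contains_iff _ _).mpr
      (pvCanReach_sound g e _ heR hclosed (g.length + 2) u h)
  · intro h
    have hu : u ∈ pvFix g (g.length + 1) (PySem.Set.add PySem.Set.empty e) :=
      (PySem.Set.contains_iff _ _).mp h
    obtain ⟨n, hn, hrn⟩ := hinv.2.2 u hu
    have hlen : (pvFix g (g.length + 1) (PySem.Set.add PySem.Set.empty e)).length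
        ≤ g.length + 1 := by
      have hss : pvFix g (g.length + 1) (PySem.Set.add PySem.Set.empty e) ⊆ e :: g.map Prod.fst := by
        intro x hx
        rcases hinv.2.1 x hx with rfl | hx'
        · exact List.mem_cons_self ..
        · exact List.mem_cons_of_mem _ hx'
      calc (pvFix g (g.length + 1) (PySem.Set.add PySem.Set.empty e)).length
          = (pvFix g (g.length + 1) (PySem.Set.add PySem.Set.empty e)).toFinset.card :=
            (List.toFinset_card_of_nodup hinv.1).symm
        _ ≤ (e :: g.map Prod.fst).toFinset.card := by
            apply Finset.card_le_card
            intro x hx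
            simp only [List.mem_toFinset] at hx ⊢
            exact hss hx
        _ ≤ (e :: g.map Prod.fst).length := List.toFinset_card_le _
        _ = g.length + 1 := by simp
    exact pvReachN_canReach g e n u hrn (g.length + 2) (by omega)

-- the two pushing folds coincide and push only r-members
theorem pvFold_eq (g : List (String × List String)) (e : String) (cf : Nat)
    (r : PySem.Set String) (hcr : ∀ v, pvCanReach g e cf v = r.contains v) (node : String) :
    ∀ (ns : List String) (st : List String) (ed : PySem.Set (String × String)),
      (∀ x ∈ st, r.contains x = true) →
      (ns.foldl (fun (acc : List String × PySem.Set (String × String)) v =>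
          if pvCanReach g e cf v then (v :: acc.1, acc.2.add (node, v)) else acc) (st, ed)
        = ns.foldl (fun (acc : List String × PySem.Set (String × String)) v =>
          if r.contains v then (v :: acc.1, acc.2.add (node, v)) else acc) (st, ed)) ∧
      (∀ x ∈ (ns.foldl (fun (acc : List String × PySem.Set (String × String)) v =>
          if r.contains v then (v :: acc.1, acc.2.add (node, v)) else acc) (st, ed)).1,
        r.contains x = true) := by
  intro ns
  induction ns with
  | nil => intro st ed hst; exact ⟨rfl, hst⟩
  | cons v ns ih =>
    intro st ed hst
    simp only [List.foldl_cons, hcr v]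
    cases hv : r.contains v with
    | true =>
      simp only [if_true]
      refine ih (v :: st) (ed.add (node, v)) ?_
      intro x hx
      rcases List.mem_cons.mp hx with rfl | hx'
      · exact hv
      · exact hst x hx'
    | false =>
      simp only [Bool.false_eq_true, if_false]
      exact ih st ed hst

-- bisimulation of the two walks
theorem pvLoop_eq (g : List (String × List String)) (e : String) (cf : Nat)
    (r : PySem.Set String) (hcr : ∀ v, pvCanReach g e cf v = r.contains v) :
    ∀ (f : Nat) (stack : List String) (nodes : PySem.Set String)
      (edges : PySem.Set (String × String)),
      (∀ x ∈ stack, r.contains x = true) →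
      pvLoopA g e cf f stack nodes nodes edges = pvLoopB g r f stack nodes edges := by
  intro f
  induction f with
  | zero => intro stack nodes edges _; rfl
  | succ f ih =>
    intro stack nodes edges hst
    cases stack with
    | nil => rfl
    | cons node st =>
      simp only [pvLoopA, pvLoopB]
      cases hc : nodes.contains node with
      | true =>
        simp only [if_true]
        exact ih st nodes edges (fun x hx => hst x (List.mem_cons_of_mem node hx))
      | false =>
        simp only [Bool.false_eq_true, if_false]
        have hnode : r.contains node = true := hst node (List.mem_cons_self ..)
        rw [hcr node, hnode]
        simp only [Bool.true_eq_false, if_false]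
        cases hg : (PySem.Dict.mk g).get? node with
        | none =>
          simp only [Option.getD_none, List.foldl_nil]
          exact ih st (nodes.add node) edges (fun x hx => hst x (List.mem_cons_of_mem node hx))
        | some ns =>
          simp only [Option.getD_some]
          have hstt : ∀ x ∈ st, r.contains x = true :=
            fun x hx => hst x (List.mem_cons_of_mem node hx)
          obtain ⟨hfe, hfm⟩ := pvFold_eq g e cf r hcr node ns st edges hstt
          rw [hfe]
          exact ih _ (nodes.add node) _ hfm

-- ===== VERDICT (by name: the statement is the Claim_ definition above) =====
theorem get_path_elements_spec : Claim_equal_get_path_elements := by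
  intro graph start end_ _hdom hpre
  unfold Spec_get_path_elements
  obtain ⟨hnd, _hacyc⟩ := hpre
  have hcr := pvReach_agree graph end_ hnd
  simp only [get_path_elements, get_path_elements_alt]
  rw [hcr start]
  cases hs : (pvFix graph (graph.length + 1) (PySem.Set.add PySem.Set.empty end_)).contains start with
  | true =>
    simp only [Bool.true_eq_false, if_false]
    exact pvLoop_eq graph end_ (graph.length + 2) _ hcr (pvLoopFuel graph)
      [start] PySem.Set.empty PySem.Set.empty
      (fun x hx => by rw [List.mem_singleton.mp hx]; exact hs)
  | false =>
    simp only [if_true]
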